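-- pv_equiv track=rewrite | github.com/HerodotusDev/hdp-cairo | tools/py/mmr.py | tree_pos_height
-- ===== SOURCE A (Python) =====
-- def tree_pos_height(pos: int) -> int:
--     """
--     calculate pos height in tree
--     Explains:
--     https://github.com/mimblewimble/grin/blob/0ff6763ee64e5a14e70ddd4642b99789a1648a32/core/src/core/pmmr.rs#L606
--     use binary expression to find tree height(all one position number)
--     return pos height
--     """
--     # convert from 0-based to 1-based position, see document
--     pos += 1
--     bit_length = pos.bit_length()
--     while not (1 << bit_length) - 1 == pos:
--         most_significant_bits = 1 << bit_length - 1
--         pos -= most_significant_bits - 1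
--         bit_length = pos.bit_length()
--
--     return bit_length - 1
-- ===== SOURCE B (Python) =====
-- def tree_pos_height(pos: int) -> int:
--     # grin-style single descent over decreasing peak sizes; the remainder is the height
--     peak = (1 << (pos + 1).bit_length()) - 1
--     while peak != 0:
--         if pos >= peak:
--             pos -= peak
--         peak >>= 1
--     return pos
-- ===== Notes on version B (the rewrite author's own statement) =====
-- stated objective: idiomatic
-- what changed: Replaces A's repeated strip-the-top-peak loop (recomputing bit_length and testing an all-ones equality each iteration) by the standard grin peak_map_height descent: compute the largest peak size once, then a single pass over halving peak sizes subtracting when possible; the remainder is the height.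
-- outside the precondition, e.g. on tree_pos_height(-2): A does not finish within the time limit, B returns -2
import Mathlib
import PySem

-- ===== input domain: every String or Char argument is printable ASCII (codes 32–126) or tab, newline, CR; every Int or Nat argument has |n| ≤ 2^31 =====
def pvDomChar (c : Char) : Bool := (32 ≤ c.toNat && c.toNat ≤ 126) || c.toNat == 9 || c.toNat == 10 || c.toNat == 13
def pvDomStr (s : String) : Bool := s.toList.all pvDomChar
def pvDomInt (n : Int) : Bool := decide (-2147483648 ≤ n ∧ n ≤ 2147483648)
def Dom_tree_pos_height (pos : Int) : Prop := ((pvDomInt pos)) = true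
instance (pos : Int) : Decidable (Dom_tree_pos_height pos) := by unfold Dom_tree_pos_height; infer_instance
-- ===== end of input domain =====

-- B replaces A's repeated strip-top-peak loop by the single grin-style descent over halving
-- peak sizes (idiomatic form of the algorithm A's docstring links to); return values only.

-- ===== PORT A =====
-- A's while-loop over the 1-based position n = pos+1; Python's n.bit_length() for n ≥ 0 is
-- Nat.size.  For pos ≤ -2 the Python loop never terminates (excluded by Pre_); there the
-- Int.toNat clamp below is irrelevant to the claim.
def tree_pos_height_loop (n : Nat) : Int :=
  if 2 ^ n.size - 1 = n then (n.size : Int) - 1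
  else tree_pos_height_loop (n - (2 ^ (n.size - 1) - 1))
termination_by n
decreasing_by
  rename_i h
  have h0 : n ≠ 0 := by
    rintro rfl; simp [Nat.size_zero] at h
  have h1 : n.size ≠ 1 := by
    intro hs
    have hlt : n < 2 ^ 1 := Nat.size_le.mp (le_of_eq hs)
    have hge : 2 ^ 0 ≤ n := Nat.lt_size.mp (by omega)
    have hn1 : n = 1 := by simp at hlt hge; omega
    exact h (by rw [hs, hn1]; norm_num)
  have hs2 : 2 ≤ n.size := by
    rcases Nat.eq_zero_or_pos n.size with hz | hp
    · exact absurd (Nat.size_eq_zero.mp hz) h0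
    · omega
  have hpow : 2 ≤ 2 ^ (n.size - 1) := by
    calc 2 = 2 ^ 1 := by norm_num
    _ ≤ 2 ^ (n.size - 1) := Nat.pow_le_pow_right (by norm_num) (by omega)
  omega

def tree_pos_height (pos : Int) : Int := tree_pos_height_loop (pos + 1).toNat

-- ===== PORT B =====
-- Source B's while-loop: peak descends 2^k-1, 2^(k-1)-1, …, 1 (peak >>= 1 = peak / 2).
def tree_pos_height_desc (pos : Int) (peak : Nat) : Int :=
  if peak ≠ 0 then
    tree_pos_height_desc (if (peak : Int) ≤ pos then pos - peak else pos) (peak / 2)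
  else pos
termination_by peak
decreasing_by omega

def tree_pos_height_alt (pos : Int) : Int :=
  tree_pos_height_desc pos (2 ^ (pos + 1).toNat.size - 1)

-- ===== PRECONDITION & SPEC =====
-- Pre_ excludes only pos ≤ -2, where Python A never returns (its loop subtracts 0 forever);
-- at every pos ≥ -1 A returns and the claim covers it.
def Pre_tree_pos_height (pos : Int) : Prop := -1 ≤ pos
instance (pos : Int) : Decidable (Pre_tree_pos_height pos) := by unfold Pre_tree_pos_height; infer_instance
def pvWitness_tree_pos_height : Int := (7)

def Spec_tree_pos_height (pos : Int) (out : Int) : Prop := out = tree_pos_height_alt pos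
instance (pos : Int) (out : Int) : Decidable (Spec_tree_pos_height pos out) := by unfold Spec_tree_pos_height; infer_instance

-- ===== CLAIM (what is proved, stated in full; the proofs are below) =====
def Claim_equal_tree_pos_height : Prop := ∀ (pos : Int), Dom_tree_pos_height pos → Pre_tree_pos_height pos → Spec_tree_pos_height pos (tree_pos_height pos)

-- ===== LEMMAS AND PROOFS =====

-- Nat-level shadow of B's descent, used only in the proofs.
def descN (v peak : Nat) : Nat :=
  if peak ≠ 0 then descN (if peak ≤ v then v - peak else v) (peak / 2) else v
termination_by peak
decreasing_by omega

lemma desc_eq_descN : ∀ peak v : Nat, tree_pos_height_desc (v : Int) peak = (descN v peak : Int) := by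
  intro peak
  induction peak using Nat.strong_induction_on with
  | _ peak ih =>
    intro v
    rw [tree_pos_height_desc, descN]
    by_cases hp : peak = 0
    · simp [hp]
    · have hhalf : peak / 2 < peak := by omega
      simp only [hp, ne_eq, not_false_iff, if_true]
      by_cases hle : peak ≤ v
      · have : ((peak : Int) ≤ (v : Int)) := by exact_mod_cast hle
        rw [if_pos this, if_pos hle, ← Nat.cast_sub hle, ih _ hhalf]
      · have : ¬ ((peak : Int) ≤ (v : Int)) := by exact_mod_cast hle
        rw [if_neg this, if_neg hle, ih _ hhalf]

-- all remaining peaks get subtracted once v is large enough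
lemma descN_big : ∀ m v : Nat, 2 ^ (m + 1) ≤ v + 2 → descN v (2 ^ m - 1) = v - (2 ^ (m + 1) - m - 2) := by
  intro m
  induction m with
  | zero => intro v _; rw [descN]; simp
  | succ m ih =>
    intro v hv
    have hp1 : (1:Nat) ≤ 2 ^ m := Nat.one_le_two_pow
    have hp2 : 2 ^ (m + 1) = 2 * 2 ^ m := by ring
    have hp3 : 2 ^ (m + 1 + 1) = 4 * 2 ^ m := by ring
    have hp4 : m < 2 ^ m := Nat.lt_two_pow_self
    rw [descN]
    have hne : 2 ^ (m + 1) - 1 ≠ 0 := by omega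
    have hle : 2 ^ (m + 1) - 1 ≤ v := by omega
    have hdiv : (2 ^ (m + 1) - 1) / 2 = 2 ^ m - 1 := by omega
    rw [if_pos hne, if_pos hle, hdiv, ih _ (by omega)]
    omega

-- the descent from peak 2^k - 1 computes A's loop on the 1-based position v+1
lemma descN_eq_loop : ∀ k v : Nat, v + 2 ≤ 2 ^ (k + 1) → (descN v (2 ^ k - 1) : Int) = tree_pos_height_loop (v + 1) := by
  intro k
  induction k using Nat.strong_induction_on with
  | _ k ih =>
    intro v hv
    match k, ih with
    | 0, _ =>
      have hv0 : v = 0 := by simpa using hv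
      subst hv0
      rw [descN, tree_pos_height_loop]
      norm_num [Nat.size_one]
    | k + 1, ih =>
      have hp1 : (1:Nat) ≤ 2 ^ k := Nat.one_le_two_pow
      have hp2 : 2 ^ (k + 1) = 2 * 2 ^ k := by ring
      have hp3 : 2 ^ (k + 2) = 4 * 2 ^ k := by ring
      have hp3' : 2 ^ (k + 1 + 1) = 4 * 2 ^ k := by ring
      have hp4 : k < 2 ^ k := Nat.lt_two_pow_self
      have hne : 2 ^ (k + 1) - 1 ≠ 0 := by omega
      have hdiv : (2 ^ (k + 1) - 1) / 2 = 2 ^ k - 1 := by omega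
      rw [descN, if_pos hne, hdiv]
      by_cases hbig : 2 ^ (k + 1) - 1 ≤ v
      · -- subtract the top peak
        rw [if_pos hbig]
        have hsize : (v + 1).size = k + 2 := by
          have h1 : (v + 1).size ≤ k + 2 := Nat.size_le.mpr (by omega)
          have h2 : k + 1 < (v + 1).size := Nat.lt_size.mpr (by omega)
          omega
        by_cases hall : v = 2 ^ (k + 2) - 2
        · -- v+1 is all ones: A returns k+1; B subtracts every remaining peak
          subst hall
          rw [tree_pos_height_loop]
          have hcond : 2 ^ (2 ^ (k + 2) - 2 + 1).size - 1 = 2 ^ (k + 2) - 2 + 1 := by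
            rw [hsize]; omega
          rw [if_pos hcond, hsize]
          have hsub : 2 ^ (k + 2) - 2 - (2 ^ (k + 1) - 1) = 2 ^ (k + 1) - 1 := by omega
          rw [hsub, descN_big k _ (by omega)]
          have : 2 ^ (k + 1) - 1 - (2 ^ (k + 1) - k - 2) = k + 1 := by omega
          rw [this]
          push_cast
          ring
        · -- not all ones: A recurses with the same subtraction
          have hvlt : v + 2 < 2 ^ (k + 2) := by omega
          rw [tree_pos_height_loop]
          have hcond : ¬ (2 ^ (v + 1).size - 1 = v + 1) := by
            rw [hsize]; omega
          rw [if_neg hcond, hsize]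
          have harg : v + 1 - (2 ^ (k + 2 - 1) - 1) = v - (2 ^ (k + 1) - 1) + 1 := by
            have : k + 2 - 1 = k + 1 := by omega
            rw [this]; omega
          rw [harg]
          exact ih k (by omega) _ (by omega)
      · -- top peak skipped
        rw [if_neg hbig]
        exact ih k (by omega) v (by omega)

-- ===== VERDICT (by name: the statement is the Claim_ definition above) =====
theorem tree_pos_height_spec : Claim_equal_tree_pos_height := by
  unfold Claim_equal_tree_pos_height
  intro pos _ hpre
  unfold Spec_tree_pos_height tree_pos_height tree_pos_height_alt
  unfold Pre_tree_pos_height at hpre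
  by_cases hneg : pos = -1
  · subst hneg
    norm_num
    rw [tree_pos_height_desc, tree_pos_height_loop]
    norm_num [Nat.size_zero]
  · have hpos : 0 ≤ pos := by omega
    obtain ⟨p, rfl⟩ : ∃ p : Nat, pos = (p : Int) := ⟨pos.toNat, (Int.toNat_of_nonneg hpos).symm⟩
    have htn : ((p : Int) + 1).toNat = p + 1 := by omega
    rw [htn, desc_eq_descN]
    have hlt : p + 1 < 2 ^ (p + 1).size := Nat.lt_size_self _
    rw [descN_eq_loop ((p + 1).size) p (by omega)]
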